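-- pv_equiv track=rewrite | github.com/tkentrich/Python | calc/util.py | bamatch
-- ===== SOURCE A (Python) =====
-- def bamatch(pbam, sol):
--   if sol >= 2 ** len(pbam):
--     return False
--   bsol = bin(sol)[2:].zfill(len(pbam))[0:len(pbam)]
--   for i,c in enumerate(pbam):
--     if c in ['0','1'] and c != bsol[i]:
--       return False
--   return True
-- ===== SOURCE B (Python) =====
-- def bamatch(pbam, sol):
--   # one right-to-left arithmetic pass: peel bits of sol with % and //,
--   # no binary-string conversion at all
--   if sol >= 2 ** len(pbam):
--     return False
--   rem = sol
--   for c in reversed(pbam):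
--     bit = rem % 2
--     rem //= 2
--     if c == '0' and bit != 0:
--       return False
--     if c == '1' and bit != 1:
--       return False
--   return True
-- ===== Notes on version B (the rewrite author's own statement) =====
-- stated objective: alternative
-- what changed: B drops the bin()/zfill string construction entirely and instead peels sol's bits arithmetically (rem % 2, rem //= 2) in one right-to-left pass over the pattern, comparing bits as integers.
-- outside the precondition, e.g. on bamatch('1', -1): A returns False, B returns True
import Mathlib
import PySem

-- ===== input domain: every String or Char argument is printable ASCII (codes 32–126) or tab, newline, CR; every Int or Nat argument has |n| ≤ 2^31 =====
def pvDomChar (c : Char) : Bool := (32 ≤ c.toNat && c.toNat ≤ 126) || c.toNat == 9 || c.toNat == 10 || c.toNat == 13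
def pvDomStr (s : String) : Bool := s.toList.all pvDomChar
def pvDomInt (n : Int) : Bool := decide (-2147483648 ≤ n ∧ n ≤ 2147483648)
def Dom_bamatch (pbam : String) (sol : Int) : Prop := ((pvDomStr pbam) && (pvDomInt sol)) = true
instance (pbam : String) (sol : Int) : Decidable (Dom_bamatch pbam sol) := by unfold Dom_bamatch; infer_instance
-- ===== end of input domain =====

-- B replaces A's bin()/zfill padded-string construction by one right-to-left arithmetic
-- pass peeling bits of sol with % 2 and // 2 (objective: alternative, same cost).

-- ===== PORT A =====
-- bin(n)[2:] digits for a positive number (msb first); bin(0)[2:] handled in binTail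
def natBits : Nat → List Char
  | 0 => []
  | n+1 => natBits ((n+1)/2) ++ [if (n+1) % 2 = 1 then '1' else '0']
decreasing_by exact Nat.div_lt_self (Nat.succ_pos n) one_lt_two

-- bin(sol)[2:] : for negative sol Python gives '-0b…' so [2:] keeps a literal 'b'
def binTail (sol : Int) : List Char :=
  if sol < 0 then 'b' :: natBits (-sol).toNat
  else if sol = 0 then ['0']
  else natBits sol.toNat

-- bin(sol)[2:].zfill(len(pbam))[0:len(pbam)]  (zfill left-pads with '0'; no sign char here)
def aBsol (pbam : String) (sol : Int) : List Char :=
  (List.replicate (pbam.toList.length - (binTail sol).length) '0' ++ binTail sol).take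
    pbam.toList.length

-- for i,c in enumerate(pbam): … (bsol[i] is always in range here, so pyGet? is exact)
def aLoop (bsol : List Char) : Int → List Char → Bool
  | _, [] => true
  | i, c :: cs =>
    if (c == '0' || c == '1') && (PySem.List.pyGet? bsol i != some c) then false
    else aLoop bsol (i + 1) cs

def bamatch (pbam : String) (sol : Int) : Bool :=
  if sol ≥ (2 : Int) ^ pbam.toList.length then false
  else aLoop (aBsol pbam sol) 0 pbam.toList

-- ===== PORT B =====
def bLoop : List Char → Int → Bool
  | [], _ => true
  | c :: cs, rem =>
    let bit := PySem.Int.mod rem 2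
    let rem' := PySem.Int.floordiv rem 2
    if c == '0' && bit != 0 then false
    else if c == '1' && bit != 1 then false
    else bLoop cs rem'

def bamatch_alt (pbam : String) (sol : Int) : Bool :=
  if sol ≥ (2 : Int) ^ pbam.toList.length then false
  else bLoop pbam.toList.reverse sol

-- ===== PRECONDITION & SPEC =====
-- Pre_ restricts to the natural domain: non-negative sol (plus any sol when the pattern
-- constrains no bit). For negative sol with a '0'/'1' in the pattern, A matches against the
-- malformed bin(-n)[2:] string (which contains a literal 'b') while B uses floor-division
-- two's-complement bits; neither value is specified for a binary-pattern matcher.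
def Pre_bamatch (pbam : String) (sol : Int) : Prop :=
  0 ≤ sol ∨ ∀ c ∈ pbam.toList, c ≠ '0' ∧ c ≠ '1'
instance (pbam : String) (sol : Int) : Decidable (Pre_bamatch pbam sol) := by
  unfold Pre_bamatch; infer_instance

def pvWitness_bamatch : String × Int := ("x01", 5)

def Spec_bamatch (pbam : String) (sol : Int) (out : Bool) : Prop := out = bamatch_alt pbam sol
instance (pbam : String) (sol : Int) (out : Bool) : Decidable (Spec_bamatch pbam sol out) := by
  unfold Spec_bamatch; infer_instance

-- ===== CLAIM (what is proved, stated in full; the proofs are below) =====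
def Claim_equal_bamatch : Prop := ∀ (pbam : String) (sol : Int), Dom_bamatch pbam sol → Pre_bamatch pbam sol → Spec_bamatch pbam sol (bamatch pbam sol)

-- ===== LEMMAS AND PROOFS =====

-- the n-digit binary string of s (mod 2^n), msb first
def bitC (s : Nat) : Char := if s % 2 = 1 then '1' else '0'

def padMsb : Nat → Nat → List Char
  | 0, _ => []
  | n+1, s => padMsb n (s / 2) ++ [bitC s]

def chk (c b : Char) : Bool := !((c == '0' || c == '1') && (b != c))

def allZip (l r : List Char) : Bool := (l.zip r).all fun p => chk p.1 p.2

theorem padMsb_length (n s : Nat) : (padMsb n s).length = n := by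
  induction n generalizing s with
  | zero => rfl
  | succ n ih => simp [padMsb, ih]

theorem padMsb_zero (n : Nat) : padMsb n 0 = List.replicate n '0' := by
  induction n with
  | zero => rfl
  | succ n ih => simp [padMsb, ih, bitC, List.replicate_succ']

theorem natBits_pad (n : Nat) : ∀ s : Nat, 0 < s → s < 2 ^ n →
    List.replicate (n - (natBits s).length) '0' ++ natBits s = padMsb n s := by
  induction n with
  | zero => intro s hs hlt; omega
  | succ n ih =>
    intro s hs hlt
    obtain ⟨m, rfl⟩ : ∃ m, s = m + 1 := ⟨s - 1, by omega⟩
    rw [natBits, padMsb]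
    by_cases h2 : (m + 1) / 2 = 0
    · have hm : m = 0 := by omega
      subst hm
      simp [natBits, padMsb_zero, bitC]
    · have hdiv : (m + 1) / 2 < 2 ^ n := by
        have := Nat.pow_succ 2 n
        omega
      have hih := ih ((m + 1) / 2) (by omega) hdiv
      rw [List.length_append, List.length_singleton]
      have harith : n + 1 - ((natBits ((m+1)/2)).length + 1) = n - (natBits ((m+1)/2)).length := by
        omega
      rw [harith, ← List.append_assoc, hih]
      simp [bitC]

theorem aBsol_pad (pbam : String) (sol : Int) (hnn : 0 ≤ sol)
    (hlt : sol < (2 : Int) ^ pbam.toList.length) :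
    aBsol pbam sol = padMsb pbam.toList.length sol.toNat := by
  unfold aBsol binTail
  set n := pbam.toList.length with hn
  rw [if_neg (by omega)]
  by_cases h0 : sol = 0
  · rw [if_pos h0, h0]
    show (List.replicate (n - 1) '0' ++ ['0']).take n = padMsb n 0
    rw [padMsb_zero]
    cases n with
    | zero => simp
    | succ k =>
      rw [List.replicate_succ']
      rw [List.take_of_length_le (by simp)]
      simp
  · rw [if_neg h0]
    have hs : 0 < sol.toNat := by omega
    have hslt : sol.toNat < 2 ^ n := by
      have : ((2 : Int) ^ n) = ((2 ^ n : Nat) : Int) := by push_cast; ring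
      omega
    rw [natBits_pad n sol.toNat hs hslt, List.take_of_length_le (by rw [padMsb_length])]

theorem aLoop_eq (bsol : List Char) : ∀ (l : List Char) (k : Nat),
    k + l.length = bsol.length → aLoop bsol (k : Int) l = allZip l (bsol.drop k) := by
  intro l
  induction l with
  | nil => intro k h; simp [aLoop, allZip]
  | cons c cs ih =>
    intro k h
    have hk : k < bsol.length := by simp at h; omega
    rw [aLoop, List.drop_eq_getElem_cons hk]
    rw [PySem.List.pyGet?_natCast, List.getElem?_eq_getElem hk]
    have hsucc : (k : Int) + 1 = ((k + 1 : Nat) : Int) := by push_cast; ring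
    rw [hsucc, ih (k + 1) (by simp at h ⊢; omega)]
    have hopt : ((some bsol[k] : Option Char) != some c) = (bsol[k] != c) := by
      cases hbc : bsol[k] == c <;> simp_all [bne]
    rw [hopt]
    unfold allZip
    rw [List.zip_cons_cons, List.all_cons]
    have hchk : chk c bsol[k] = !((c == '0' || c == '1') && (bsol[k] != c)) := rfl
    cases hcond : ((c == '0' || c == '1') && (bsol[k] != c)) <;> simp [hchk, hcond]

theorem charStep (x : Char) (s : Nat) :
    (!(x == '0' && (((s % 2 : Nat) : Int) != 0)) && !(x == '1' && (((s % 2 : Nat) : Int) != 1)))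
      = chk x (bitC s) := by
  rcases Nat.mod_two_eq_zero_or_one s with h | h <;>
  · unfold chk bitC
    rw [h]
    by_cases hx0 : x = '0'
    · subst hx0; decide
    · by_cases hx1 : x = '1'
      · subst hx1; decide
      · have e0 : (x == '0') = false := by simp [hx0]
        have e1 : (x == '1') = false := by simp [hx1]
        simp [e0, e1]

theorem int_mod2 (rem : Int) (h : 0 ≤ rem) :
    PySem.Int.mod rem 2 = ((rem.toNat % 2 : Nat) : Int) := by
  rw [PySem.Int.mod_eq_emod_of_pos (by norm_num)]; omega

theorem int_div2 (rem : Int) (h : 0 ≤ rem) :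
    PySem.Int.floordiv rem 2 = ((rem.toNat / 2 : Nat) : Int) := by
  rw [PySem.Int.floordiv_eq_ediv_of_pos (by norm_num)]; omega

theorem bLoop_eq (l : List Char) : ∀ (rem : Int), 0 ≤ rem →
    bLoop l.reverse rem = allZip l (padMsb l.length rem.toNat) := by
  induction l using List.reverseRecOn with
  | nil => intro rem _; simp [bLoop, allZip]
  | append_singleton xs x ih =>
    intro rem hnn
    rw [List.reverse_append, List.reverse_singleton, List.singleton_append, bLoop]
    simp only [List.length_append, List.length_singleton, padMsb]
    have hzip : (xs ++ [x]).zip (padMsb xs.length (rem.toNat / 2) ++ [bitC rem.toNat]) =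
        xs.zip (padMsb xs.length (rem.toNat / 2)) ++ [(x, bitC rem.toNat)] := by
      rw [List.zip_append (by rw [padMsb_length])]
      rfl
    unfold allZip
    rw [hzip, List.all_append]
    have hsing : ([(x, bitC rem.toNat)].all fun p => chk p.1 p.2) = chk x (bitC rem.toNat) := by
      simp
    rw [hsing, int_mod2 rem hnn, int_div2 rem hnn]
    have hrec : bLoop xs.reverse ((rem.toNat / 2 : Nat) : Int) =
        allZip xs (padMsb xs.length (rem.toNat / 2)) := by
      rw [ih _ (by positivity), Int.toNat_natCast]
    have hstep := charStep x rem.toNat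
    by_cases h1 : (x == '0' && (((rem.toNat % 2 : Nat) : Int) != 0)) = true
    · rw [if_pos h1]
      have hc : chk x (bitC rem.toNat) = false := by rw [← hstep, h1]; simp
      rw [hc, Bool.and_false]
    · rw [if_neg h1]
      by_cases h2 : (x == '1' && (((rem.toNat % 2 : Nat) : Int) != 1)) = true
      · rw [if_pos h2]
        have hc : chk x (bitC rem.toNat) = false := by rw [← hstep, h2]; simp
        rw [hc, Bool.and_false]
      · simp only [Bool.not_eq_true] at h1 h2
        have hc : chk x (bitC rem.toNat) = true := by
          rw [← hstep, h1, h2]; decide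
        rw [if_neg (by rw [h2]; exact Bool.false_ne_true), hrec, hc, Bool.and_true]
        rfl

theorem aLoop_clean : ∀ (l : List Char), (∀ c ∈ l, c ≠ '0' ∧ c ≠ '1') →
    ∀ (bsol : List Char) (k : Int), aLoop bsol k l = true := by
  intro l
  induction l with
  | nil => intro _ _ _; rfl
  | cons c cs ih =>
    intro h bsol k
    have hc := h c (by simp)
    rw [aLoop, if_neg (by simp [hc.1, hc.2])]
    exact ih (fun d hd => h d (by simp [hd])) bsol (k + 1)

theorem bLoop_clean : ∀ (l : List Char), (∀ c ∈ l, c ≠ '0' ∧ c ≠ '1') →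
    ∀ (rem : Int), bLoop l rem = true := by
  intro l
  induction l with
  | nil => intro _ _; rfl
  | cons c cs ih =>
    intro h rem
    have hc := h c (by simp)
    rw [bLoop, if_neg (by simp [hc.1]), if_neg (by simp [hc.2])]
    exact ih (fun d hd => h d (by simp [hd])) _

-- ===== VERDICT (by name: the statement is the Claim_ definition above) =====
theorem bamatch_spec : Claim_equal_bamatch := by
  intro pbam sol _hdom hpre
  unfold Spec_bamatch bamatch bamatch_alt
  by_cases hg : sol ≥ (2 : Int) ^ pbam.toList.length
  · rw [if_pos hg, if_pos hg]
  · rw [if_neg hg, if_neg hg]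
    rcases hpre with hnn | hclean
    · have hlt : sol < (2 : Int) ^ pbam.toList.length := lt_of_not_ge hg
      rw [aBsol_pad pbam sol hnn hlt]
      have h0 : (0 : Int) = ((0 : Nat) : Int) := rfl
      rw [h0, aLoop_eq (padMsb pbam.toList.length sol.toNat) pbam.toList 0
        (by simp [padMsb_length])]
      rw [List.drop_zero, bLoop_eq pbam.toList sol hnn]
    · rw [aLoop_clean pbam.toList hclean, bLoop_clean pbam.toList.reverse
        (fun c hc => hclean c (List.mem_reverse.mp hc)) sol]
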